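-- pv_equiv track=rewrite | github.com/SnowXLee/jisuanti | jiaJianfaYunSuan/jiajianfa.py | pb
-- ===== SOURCE A (Python) =====
-- def pb(tb):
--   #统计一个题本中有多少个种类的题型——txzl；题型的0及双数是题；题型的单数是答案，是单数减一的题的得数
--   txzl = int(len(tb) / 2)  #tb题本——是一个一个二元列表包含该题本所包含的所有题型种类
--   jstL = []  #题型的0及双数是计算题
--   dsL = []  #题型的单数是得数，是单数减一的题的得数
--   pbtb = []  #分离了得数与计算题的排版题本
--   for i in range(len(tb)):
--     if (i == 0) or ((i % 2) == 0):
--       #将不同体型的计算题合并在一个一元列表里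
--       for j in range(len(tb[i])):
--         jstL.append(tb[i][j])
--     elif (i % 2) != 0:
--       for k in range(len(tb[i])):
--         dsL.append(tb[i][k])
--   pbtb.append(jstL)
--   pbtb.append(dsL)
--   return pbtb
-- ===== SOURCE B (Python) =====
-- def pb(tb):
--   # simpler: recursive pairwise split (question row, answer row) instead of an
--   # index loop with an i%2 branch
--   j, d = _split(tb)
--   return [j, d]
--
-- def _split(tb):
--   if not tb:
--     return [], []
--   if len(tb) == 1:
--     return list(tb[0]), []
--   j, d = _split(tb[2:])
--   return tb[0] + j, tb[1] + d
-- ===== Notes on version B (the rewrite author's own statement) =====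
-- stated objective: simpler
-- what changed: Replaces the range(len(tb)) index loop with an i%2 branch and element-by-element appends by a direct structural recursion that consumes two sublists (question row, answer row) at a time and concatenates them.
import Mathlib
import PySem

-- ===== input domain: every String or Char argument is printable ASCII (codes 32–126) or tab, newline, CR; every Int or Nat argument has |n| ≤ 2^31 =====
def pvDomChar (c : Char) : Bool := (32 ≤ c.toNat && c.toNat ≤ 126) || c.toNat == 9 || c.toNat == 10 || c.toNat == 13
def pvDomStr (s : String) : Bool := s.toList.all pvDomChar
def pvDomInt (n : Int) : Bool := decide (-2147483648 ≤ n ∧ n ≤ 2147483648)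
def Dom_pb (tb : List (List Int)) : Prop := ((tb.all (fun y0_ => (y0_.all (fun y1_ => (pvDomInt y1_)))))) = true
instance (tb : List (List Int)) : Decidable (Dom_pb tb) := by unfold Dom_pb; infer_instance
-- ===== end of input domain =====

-- B replaces A's index loop with an i%2 branch by a structural recursion consuming two rows at a time (simpler decomposition, same cost).

-- ===== PORT A =====
-- literal transliteration of A's index loop; '(… .pyGet? …).getD …' is a totality
-- guard for indices that the range keeps in bounds anyway
def pb (tb : List (List Int)) : List (List Int) :=
  let _txzl : Int := (tb.length : Int) / 2  -- int(len(tb)/2); unused, exact on nonneg lengths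
  let st := (PySem.List.pyRange 0 (tb.length : Int) 1).foldl
    (fun (st : List Int × List Int) i =>
      if i == 0 || PySem.Int.mod i 2 == 0 then
        let row := PySem.List.pyGetD tb i []
        ((PySem.List.pyRange 0 (row.length : Int) 1).foldl
            (fun acc j => acc ++ [PySem.List.pyGetD row j 0]) st.1, st.2)
      else
        let row := PySem.List.pyGetD tb i []
        (st.1, (PySem.List.pyRange 0 (row.length : Int) 1).foldl
            (fun acc k => acc ++ [PySem.List.pyGetD row k 0]) st.2))
    ([], [])
  [st.1, st.2]

-- ===== PORT B =====
def pbSplit : List (List Int) → List Int × List Int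
  | [] => ([], [])
  | [a] => (a, [])
  | a :: b :: rest =>
    let (j, d) := pbSplit rest
    (a ++ j, b ++ d)

def pb_alt (tb : List (List Int)) : List (List Int) :=
  let (j, d) := pbSplit tb
  [j, d]

-- ===== PRECONDITION & SPEC =====
def Spec_pb (tb : List (List Int)) (out : List (List Int)) : Prop := out = pb_alt tb
instance (tb : List (List Int)) (out : List (List Int)) : Decidable (Spec_pb tb out) := by unfold Spec_pb; infer_instance

-- ===== CLAIM (what is proved, stated in full; the proofs are below) =====
def Claim_equal_pb : Prop := ∀ (tb : List (List Int)), Dom_pb tb → Spec_pb tb (pb tb)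

-- ===== LEMMAS AND PROOFS =====

-- the inner element-appending loop of A is just list append
lemma pb_inner (row acc : List Int) :
    (PySem.List.pyRange 0 (row.length : Int) 1).foldl
      (fun acc j => acc ++ [PySem.List.pyGetD row j 0]) acc = acc ++ row := by
  rw [PySem.List.foldl_pyRange_zero_pyGetD' row 0 (fun a x => a ++ [x]) acc]
  exact PySem.List.foldl_append_singleton_eq_self row acc

abbrev pbStep : (List Int × List Int) → Int × List Int → List Int × List Int :=
  fun st p =>
    if p.1 == 0 || PySem.Int.mod p.1 2 == 0 then (st.1 ++ p.2, st.2) else (st.1, st.2 ++ p.2)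

-- the outer loop over (index, row) pairs, started at an even index, is pbSplit
lemma pb_outer (tb : List (List Int)) : ∀ (s : Int) (j d : List Int),
    0 ≤ s → s % 2 = 0 →
    (PySem.List.enumerate tb s).foldl pbStep (j, d) =
      (j ++ (pbSplit tb).1, d ++ (pbSplit tb).2) := by
  induction tb using pbSplit.induct with
  | case1 => intro s j d _ _; simp [PySem.List.enumerate_nil, pbSplit]
  | case2 a =>
    intro s j d hs he
    have hm : PySem.Int.mod s 2 = s % 2 := PySem.Int.mod_eq_emod_of_pos (by omega)
    simp [PySem.List.enumerate_cons, PySem.List.enumerate_nil, pbStep, pbSplit, he]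
  | case3 a b rest j' d' hjd ih =>
    intro s j d hs he
    have h1 : (s == 0 || PySem.Int.mod s 2 == 0) = true := by
      simp [he]
    have h2 : (s + 1 == 0 || PySem.Int.mod (s + 1) 2 == 0) = false := by
      simp; omega
    rw [PySem.List.enumerate_cons, PySem.List.enumerate_cons]
    simp only [List.foldl_cons, pbStep, h1, h2, if_true, if_false, Bool.false_eq_true]
    rw [ih (s + 1 + 1) _ _ (by omega) (by omega)]
    simp [pbSplit]

theorem pb_spec : Claim_equal_pb := by
  intro tb _
  unfold Spec_pb pb pb_alt
  have hen := PySem.List.enumerate_eq_map_pyRange tb ([] : List Int)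
  have : (PySem.List.pyRange 0 (tb.length : Int) 1).foldl
      (fun (st : List Int × List Int) i =>
        if i == 0 || PySem.Int.mod i 2 == 0 then
          let row := PySem.List.pyGetD tb i []
          ((PySem.List.pyRange 0 (row.length : Int) 1).foldl
              (fun acc j => acc ++ [PySem.List.pyGetD row j 0]) st.1, st.2)
        else
          let row := PySem.List.pyGetD tb i []
          (st.1, (PySem.List.pyRange 0 (row.length : Int) 1).foldl
              (fun acc k => acc ++ [PySem.List.pyGetD row k 0]) st.2))
      ([], []) = (PySem.List.enumerate tb 0).foldl pbStep ([], []) := by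
    rw [hen, List.foldl_map]
    apply PySem.List.foldl_congr_mem
    intro st p _
    dsimp only [pbStep]
    split <;> rw [pb_inner]
  rw [this, pb_outer tb 0 [] [] (by omega) (by omega)]
  simp
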